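-- pv_equiv track=rewrite | github.com/alecbarber/parsimony-unlambda | tm/unlambda/run.py | evaluate_unl_ltr
-- ===== SOURCE A (Python) =====
-- def find_block_end(unl, idx):
--     counter = 1
--     end = idx
--     while counter:
--         if unl[end] == '`':
--             counter += 1
--         else:
--             counter -= 1
--         end += 1
--     return end
--
-- def evaluate_unl_ltr(unl):
--     # Initial state
--     ticks_matched = 0
--     idx = 0
--
--     while idx < len(unl):
--         ticks_matched_new = ticks_matched
--         if unl[idx] == '`':
--             ticks_matched_new += 1
--         else:
--             ticks_matched_new = 0
--
--         if ticks_matched and unl[idx] == 'i':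
--             return unl[:idx - 1] + unl[idx + 1:]
--         elif ticks_matched > 1 and unl[idx] == 'k':
--             x_start = idx + 1
--             y_start = find_block_end(unl, x_start)
--             y_end = find_block_end(unl, y_start)
--             X = unl[x_start : y_start]
--             return unl[:idx - 2] + X + unl[y_end:]
--         elif ticks_matched > 2 and unl[idx] == 's':
--             x_start = idx + 1
--             y_start = find_block_end(unl, x_start)
--             z_start = find_block_end(unl, y_start)
--             z_end = find_block_end(unl, z_start)
--             X = unl[x_start : y_start]
--             Y = unl[y_start : z_start]
--             Z = unl[z_start : z_end]
--             return unl[:idx - 3] + '``' + X + Z + '`' + Y + Z + unl[z_end:]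
--
--         ticks_matched = ticks_matched_new
--         idx += 1
--
--     return unl
-- ===== SOURCE B (Python) =====
-- # B: instead of A's per-character state machine, locate the leftmost redex head
-- # directly with str.find on the three redex patterns, then rewrite once.
-- # Block ends are found by a balance scan (term complete when balance first hits +1),
-- # raising the same IndexError as A on truncated/unbalanced operand lists.
--
-- def term_end(unl, i):
--     bal, e = 0, i
--     while bal != 1:
--         bal += -1 if unl[e] == '`' else 1
--         e += 1
--     return e
--
-- def evaluate_unl_ltr(unl):
--     spots = []
--     for pat in ('`i', '``k', '```s'):
--         p = unl.find(pat)
--         if p != -1: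
--             spots.append(p + len(pat) - 1)
--     if not spots:
--         return unl
--     idx = min(spots)
--     op = unl[idx]
--     if op == 'i':
--         return unl[:idx - 1] + unl[idx + 1:]
--     x_end = term_end(unl, idx + 1)
--     y_end = term_end(unl, x_end)
--     if op == 'k':
--         return unl[:idx - 2] + unl[idx + 1:x_end] + unl[y_end:]
--     z_end = term_end(unl, y_end)
--     X = unl[idx + 1:x_end]
--     Y = unl[x_end:y_end]
--     Z = unl[y_end:z_end]
--     return unl[:idx - 3] + '``' + X + Z + '`' + Y + Z + unl[z_end:]
-- ===== Notes on version B (the rewrite author's own statement) =====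
-- stated objective: faster
-- what changed: B replaces A's per-character tick-counting state machine by locating the leftmost redex head directly with str.find on the three redex patterns ('`i', '``k', '```s') and applying the single rewrite, with operand blocks delimited by a balance scan instead of A's pending-operand counter.
import Mathlib
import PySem

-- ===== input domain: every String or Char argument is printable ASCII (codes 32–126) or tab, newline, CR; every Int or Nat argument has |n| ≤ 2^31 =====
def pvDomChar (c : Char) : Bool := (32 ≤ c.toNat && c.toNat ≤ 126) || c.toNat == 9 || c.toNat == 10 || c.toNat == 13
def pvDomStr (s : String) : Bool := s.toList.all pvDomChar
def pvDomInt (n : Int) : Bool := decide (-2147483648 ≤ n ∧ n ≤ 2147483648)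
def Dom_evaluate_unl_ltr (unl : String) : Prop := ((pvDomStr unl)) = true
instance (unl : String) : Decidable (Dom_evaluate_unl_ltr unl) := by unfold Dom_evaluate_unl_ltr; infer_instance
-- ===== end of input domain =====

-- B replaces A's per-character tick-counting state machine by direct substring searches
-- for the three redex patterns plus a single rewrite; equal return values wherever A returns.

-- ===== PORT A =====
-- find_block_end: Python's while-counter loop; unl[end] off the end (IndexError) → none.
def findBlockEnd (cs : List Char) (counter : Nat) (e : Nat) : Option Nat :=
  if counter = 0 then some e
  else
    match h : cs[e]? with
    | none => none
    | some c => findBlockEnd cs (if c = '`' then counter + 1 else counter - 1) (e + 1)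
termination_by cs.length - e
decreasing_by
  have : e < cs.length := by
    by_contra hc
    rw [List.getElem?_eq_none (Nat.le_of_not_lt hc)] at h
    simp at h
  omega

-- the main while-loop of A, state (ticks_matched, idx); Python's `unl[:idx-1]`-style
-- slices use idx-1/idx-2/idx-3 only when ticks_matched ≥ 1/2/3, which (run-length
-- invariant, entry tm = 0) forces idx ≥ 1/2/3, so Nat subtraction is exact here.
def evalAuxA (cs : List Char) (tm : Nat) (idx : Nat) : Option (List Char) :=
  if _h : idx < cs.length then
    let c := cs[idx]
    if tm ≠ 0 ∧ c = 'i' then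
      some (cs.take (idx - 1) ++ cs.drop (idx + 1))
    else if 1 < tm ∧ c = 'k' then
      match findBlockEnd cs 1 (idx + 1) with
      | none => none
      | some yStart =>
        match findBlockEnd cs 1 yStart with
        | none => none
        | some yEnd =>
          some (cs.take (idx - 2) ++ (cs.drop (idx + 1)).take (yStart - (idx + 1)) ++ cs.drop yEnd)
    else if 2 < tm ∧ c = 's' then
      match findBlockEnd cs 1 (idx + 1) with
      | none => none
      | some yStart =>
        match findBlockEnd cs 1 yStart with
        | none => none
        | some zStart =>
          match findBlockEnd cs 1 zStart with
          | none => none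
          | some zEnd =>
            some (cs.take (idx - 3) ++ ['`', '`']
              ++ (cs.drop (idx + 1)).take (yStart - (idx + 1))
              ++ (cs.drop zStart).take (zEnd - zStart)
              ++ ['`']
              ++ (cs.drop yStart).take (zStart - yStart)
              ++ (cs.drop zStart).take (zEnd - zStart)
              ++ cs.drop zEnd)
    else
      evalAuxA cs (if c = '`' then tm + 1 else 0) (idx + 1)
  else some cs
termination_by cs.length - idx

def evaluate_unl_ltr (unl : String) : String :=
  match evalAuxA unl.toList 0 0 with
  | some l => String.ofList l
  | none => unl   -- Python raises IndexError here; excluded by Pre_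

-- ===== PORT B =====
-- term_end: balance scan, a term is complete when the balance first reaches +1;
-- unl[e] off the end (IndexError) → none.
def termEnd (cs : List Char) (bal : Int) (e : Nat) : Option Nat :=
  if bal = 1 then some e
  else
    match h : cs[e]? with
    | none => none
    | some c => termEnd cs (bal + if c = '`' then -1 else 1) (e + 1)
termination_by cs.length - e
decreasing_by
  have : e < cs.length := by
    by_contra hc
    rw [List.getElem?_eq_none (Nat.le_of_not_lt hc)] at h
    simp at h
  omega

-- spots: each str.find result p is a nonnegative int when ≠ -1, kept as Nat (exact).
def evaluate_unl_ltr_alt (unl : String) : String :=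
  let cs := unl.toList
  let spots := [['`','i'], ['`','`','k'], ['`','`','`','s']].foldl
    (fun acc pat =>
      let p := PySem.Chars.find cs pat
      if p ≠ -1 then acc ++ [p.toNat + (pat.length - 1)] else acc) []
  match PySem.List.min? spots (fun x => x) with
  | none => unl
  | some idx =>
    match cs[idx]? with
    | none => unl   -- unreachable: a found redex head lies inside the string
    | some op =>
      if op = 'i' then String.ofList (cs.take (idx - 1) ++ cs.drop (idx + 1))
      else
        match termEnd cs 0 (idx + 1) with
        | none => unl   -- Python raises IndexError here; excluded by Pre_
        | some xEnd =>
          match termEnd cs 0 xEnd with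
          | none => unl
          | some yEnd =>
            if op = 'k' then
              String.ofList (cs.take (idx - 2) ++ (cs.drop (idx + 1)).take (xEnd - (idx + 1)) ++ cs.drop yEnd)
            else
              match termEnd cs 0 yEnd with
              | none => unl
              | some zEnd =>
                String.ofList (cs.take (idx - 3) ++ ['`', '`']
                  ++ (cs.drop (idx + 1)).take (xEnd - (idx + 1))
                  ++ (cs.drop yEnd).take (zEnd - yEnd)
                  ++ ['`']
                  ++ (cs.drop xEnd).take (yEnd - xEnd)
                  ++ (cs.drop yEnd).take (zEnd - yEnd)
                  ++ cs.drop zEnd)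

-- ===== PRECONDITION & SPEC =====
-- Helpers describing the input shape: prefix balance, 'n complete blocks start at j',
-- 'a redex head sits at idx', and the leftmost redex head.
def unlBal (cs : List Char) (e : Nat) : Int :=
  ((cs.take e).map (fun c => if c = '`' then (-1 : Int) else 1)).sum

def chainB (cs : List Char) : Nat → Nat → Bool
  | 0, _ => true
  | n + 1, j => (List.range (cs.length + 1)).any fun e =>
      decide (j < e) && decide (unlBal cs e = unlBal cs j + 1) && chainB cs n e

def redexB (cs : List Char) (idx : Nat) : Bool :=
  (decide (1 ≤ idx) && (cs[idx-1]? == some '`') && (cs[idx]? == some 'i'))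
  || (decide (2 ≤ idx) && (cs[idx-2]? == some '`') && (cs[idx-1]? == some '`') && (cs[idx]? == some 'k'))
  || (decide (3 ≤ idx) && (cs[idx-3]? == some '`') && (cs[idx-2]? == some '`') && (cs[idx-1]? == some '`') && (cs[idx]? == some 's'))

-- Pre_ in closed form: for the leftmost redex head idx (if any), the operand blocks
-- that A's rewrite consumes must be completed inside the string (a balance crossing
-- exists after the head, chained once per operand).
def preB (unl : String) : Bool :=
  let cs := unl.toList
  (List.range cs.length).all fun idx =>
    !(redexB cs idx && (List.range idx).all fun t => !redexB cs t) ||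
    (if cs[idx]? == some 'i' then true
     else if cs[idx]? == some 'k' then chainB cs 2 (idx + 1)
     else chainB cs 3 (idx + 1))

-- Pre_ excludes exactly the inputs on which Python A raises IndexError (a k/s redex head
-- followed by truncated/unbalanced operands, so find_block_end runs off the end).
def Pre_evaluate_unl_ltr (unl : String) : Prop := preB unl = true
instance (unl : String) : Decidable (Pre_evaluate_unl_ltr unl) := by unfold Pre_evaluate_unl_ltr; infer_instance

def pvWitness_evaluate_unl_ltr : String := "``kis"

def Spec_evaluate_unl_ltr (unl : String) (out : String) : Prop := out = evaluate_unl_ltr_alt unl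
instance (unl : String) (out : String) : Decidable (Spec_evaluate_unl_ltr unl out) := by unfold Spec_evaluate_unl_ltr; infer_instance

-- ===== CLAIM (what is proved, stated in full; the proofs are below) =====
def Claim_equal_evaluate_unl_ltr : Prop := ∀ (unl : String), Dom_evaluate_unl_ltr unl → Pre_evaluate_unl_ltr unl → Spec_evaluate_unl_ltr unl (evaluate_unl_ltr unl)

-- ===== LEMMAS AND PROOFS =====

-- the rewrite both programs perform at redex head idx, keyed by the head character
def applyA (cs : List Char) (idx : Nat) : Option (List Char) :=
  if cs[idx]? = some 'i' then
    some (cs.take (idx - 1) ++ cs.drop (idx + 1))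
  else if cs[idx]? = some 'k' then
    match findBlockEnd cs 1 (idx + 1) with
    | none => none
    | some yStart =>
      match findBlockEnd cs 1 yStart with
      | none => none
      | some yEnd =>
        some (cs.take (idx - 2) ++ (cs.drop (idx + 1)).take (yStart - (idx + 1)) ++ cs.drop yEnd)
  else
    match findBlockEnd cs 1 (idx + 1) with
    | none => none
    | some yStart =>
      match findBlockEnd cs 1 yStart with
      | none => none
      | some zStart =>
        match findBlockEnd cs 1 zStart with
        | none => none
        | some zEnd =>
          some (cs.take (idx - 3) ++ ['`', '`']
            ++ (cs.drop (idx + 1)).take (yStart - (idx + 1))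
            ++ (cs.drop zStart).take (zEnd - zStart)
            ++ ['`']
            ++ (cs.drop yStart).take (zStart - yStart)
            ++ (cs.drop zStart).take (zEnd - zStart)
            ++ cs.drop zEnd)

-- leftmost redex head, a proof-layer notion
def firstFromGo (cs : List Char) : Nat → Nat → Option Nat
  | 0, _ => none
  | fuel + 1, idx => if redexB cs idx then some idx else firstFromGo cs fuel (idx + 1)

def firstFrom (cs : List Char) (idx : Nat) : Option Nat :=
  firstFromGo cs (cs.length - idx) idx

-- A's counter loop and B's balance loop walk the same positions: bal = 1 - counter.
lemma termEnd_eq_findBlockEnd (cs : List Char) (c : Nat) (e : Nat) :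
    termEnd cs (1 - (c : Int)) e = findBlockEnd cs c e := by
  induction c, e using findBlockEnd.induct cs with
  | case1 e => simp [termEnd, findBlockEnd]
  | case2 counter e hc h =>
      rw [findBlockEnd, if_neg hc]
      rw [termEnd, if_neg (by omega : ¬ (1 - (counter:Int) = 1))]
      rw [h]
  | case3 counter e hc ch h ih =>
      rw [findBlockEnd, if_neg hc]
      rw [termEnd, if_neg (by omega : ¬ (1 - (counter:Int) = 1))]
      rw [h]
      by_cases hch : ch = '`' <;> simp only [hch, reduceIte] at ih ⊢
      · rw [show (1:Int) - (counter:Int) + -1 = 1 - ((counter+1 : Nat):Int) by push_cast; ring]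
        exact ih
      · have h1 : 1 ≤ counter := Nat.one_le_iff_ne_zero.mpr hc
        rw [show (1:Int) - (counter:Int) + 1 = 1 - ((counter-1 : Nat):Int) by push_cast [Nat.cast_sub h1]; ring]
        exact ih

-- condition-to-pattern bridges
lemma redexB_i (cs : List Char) (idx : Nat) (h1 : 1 ≤ idx)
    (hb : cs[idx-1]? = some '`') (hc : cs[idx]? = some 'i') : redexB cs idx = true := by
  simp [redexB, h1, hb, hc]

lemma redexB_k (cs : List Char) (idx : Nat) (h1 : 2 ≤ idx)
    (hb2 : cs[idx-2]? = some '`') (hb : cs[idx-1]? = some '`') (hc : cs[idx]? = some 'k') :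
    redexB cs idx = true := by
  simp [redexB, h1, hb, hb2, hc]

lemma redexB_s (cs : List Char) (idx : Nat) (h1 : 3 ≤ idx)
    (hb3 : cs[idx-3]? = some '`') (hb2 : cs[idx-2]? = some '`') (hb : cs[idx-1]? = some '`')
    (hc : cs[idx]? = some 's') : redexB cs idx = true := by
  simp [redexB, h1, hb, hb2, hb3, hc]

lemma firstFrom_fire (cs : List Char) (idx : Nat) (hlt : idx < cs.length)
    (hr : redexB cs idx = true) : firstFrom cs idx = some idx := by
  rw [firstFrom, show cs.length - idx = (cs.length - (idx + 1)) + 1 by omega,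
      firstFromGo, if_pos hr]

lemma firstFrom_step (cs : List Char) (idx : Nat) (hlt : idx < cs.length)
    (hr : redexB cs idx = false) : firstFrom cs idx = firstFrom cs (idx + 1) := by
  rw [firstFrom, firstFrom]
  rw [show cs.length - idx = (cs.length - (idx + 1)) + 1 by omega]
  rw [firstFromGo, if_neg (by simp [hr])]


lemma firstFrom_out (cs : List Char) (idx : Nat) (hge : ¬ idx < cs.length) :
    firstFrom cs idx = none := by
  rw [firstFrom, show cs.length - idx = 0 by omega, firstFromGo]


lemma evalAuxA_eq (cs : List Char) (tm idx : Nat)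
    (h1 : tm ≤ idx)
    (h2 : ∀ t, t < tm → cs[idx - 1 - t]? = some '`')
    (h3 : tm < idx → cs[idx - 1 - tm]? ≠ some '`') :
    evalAuxA cs tm idx = (match firstFrom cs idx with
      | none => some cs
      | some j => applyA cs j) := by
  induction tm, idx using evalAuxA.induct cs with
  | case1 tm idx hlt c hcond =>
      have hi : cs[idx]? = some 'i' := by
        rw [List.getElem?_eq_getElem hlt]; exact congrArg some hcond.2
      have hid : 1 ≤ idx := lt_of_lt_of_le (Nat.pos_of_ne_zero hcond.1) h1
      have hb : cs[idx-1]? = some '`' := by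
        have := h2 0 (Nat.pos_of_ne_zero hcond.1); simpa using this
      rw [firstFrom_fire cs idx hlt (redexB_i cs idx hid hb hi)]
      rw [evalAuxA]
      simp only [dif_pos hlt]
      rw [if_pos (show tm ≠ 0 ∧ cs[idx] = 'i' from hcond)]
      rw [applyA, if_pos hi]
  | case2 tm idx hlt c hni hcond hfb =>
      have hk : cs[idx]? = some 'k' := by
        rw [List.getElem?_eq_getElem hlt]; exact congrArg some hcond.2
      have hid : 2 ≤ idx := le_trans (by omega) h1
      have hb : cs[idx-1]? = some '`' := by have := h2 0 (by omega); simpa using this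
      have hb2 : cs[idx-2]? = some '`' := by
        have := h2 1 (by omega); simpa [show idx - 1 - 1 = idx - 2 by omega] using this
      rw [firstFrom_fire cs idx hlt (redexB_k cs idx hid hb2 hb hk)]
      rw [evalAuxA]
      simp only [dif_pos hlt]
      rw [if_neg (show ¬(tm ≠ 0 ∧ cs[idx] = 'i') from hni),
          if_pos (show 1 < tm ∧ cs[idx] = 'k' from hcond)]
      rw [applyA, if_neg (by simp [hk] : ¬ cs[idx]? = some 'i'), if_pos hk,]
  | case3 tm idx hlt c hni hcond yS hfb hfb2 =>
      have hk : cs[idx]? = some 'k' := by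
        rw [List.getElem?_eq_getElem hlt]; exact congrArg some hcond.2
      have hid : 2 ≤ idx := le_trans (by omega) h1
      have hb : cs[idx-1]? = some '`' := by have := h2 0 (by omega); simpa using this
      have hb2 : cs[idx-2]? = some '`' := by
        have := h2 1 (by omega); simpa [show idx - 1 - 1 = idx - 2 by omega] using this
      rw [firstFrom_fire cs idx hlt (redexB_k cs idx hid hb2 hb hk)]
      rw [evalAuxA]
      simp only [dif_pos hlt]
      rw [if_neg (show ¬(tm ≠ 0 ∧ cs[idx] = 'i') from hni),
          if_pos (show 1 < tm ∧ cs[idx] = 'k' from hcond)]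
      rw [applyA, if_neg (by simp [hk] : ¬ cs[idx]? = some 'i'), if_pos hk]
  | case4 tm idx hlt c hni hcond yS hfb yE hfb2 =>
      have hk : cs[idx]? = some 'k' := by
        rw [List.getElem?_eq_getElem hlt]; exact congrArg some hcond.2
      have hid : 2 ≤ idx := le_trans (by omega) h1
      have hb : cs[idx-1]? = some '`' := by have := h2 0 (by omega); simpa using this
      have hb2 : cs[idx-2]? = some '`' := by
        have := h2 1 (by omega); simpa [show idx - 1 - 1 = idx - 2 by omega] using this
      rw [firstFrom_fire cs idx hlt (redexB_k cs idx hid hb2 hb hk)]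
      rw [evalAuxA]
      simp only [dif_pos hlt]
      rw [if_neg (show ¬(tm ≠ 0 ∧ cs[idx] = 'i') from hni),
          if_pos (show 1 < tm ∧ cs[idx] = 'k' from hcond)]
      rw [applyA, if_neg (by simp [hk] : ¬ cs[idx]? = some 'i'), if_pos hk]
  | case5 tm idx hlt c hni hnk hcond hfb =>
      have hs : cs[idx]? = some 's' := by
        rw [List.getElem?_eq_getElem hlt]; exact congrArg some hcond.2
      have hid : 3 ≤ idx := le_trans (by omega) h1
      have hb : cs[idx-1]? = some '`' := by have := h2 0 (by omega); simpa using this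
      have hb2 : cs[idx-2]? = some '`' := by
        have := h2 1 (by omega); simpa [show idx - 1 - 1 = idx - 2 by omega] using this
      have hb3 : cs[idx-3]? = some '`' := by
        have := h2 2 (by omega); simpa [show idx - 1 - 2 = idx - 3 by omega] using this
      rw [firstFrom_fire cs idx hlt (redexB_s cs idx hid hb3 hb2 hb hs)]
      rw [evalAuxA]
      simp only [dif_pos hlt]
      rw [if_neg (show ¬(tm ≠ 0 ∧ cs[idx] = 'i') from hni),
          if_neg (show ¬(1 < tm ∧ cs[idx] = 'k') from hnk),
          if_pos (show 2 < tm ∧ cs[idx] = 's' from hcond)]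
      rw [applyA, if_neg (by simp [hs] : ¬ cs[idx]? = some 'i'),
          if_neg (by simp [hs] : ¬ cs[idx]? = some 'k'),]
  | case6 tm idx hlt c hni hnk hcond yS hfb hfb2 =>
      have hs : cs[idx]? = some 's' := by
        rw [List.getElem?_eq_getElem hlt]; exact congrArg some hcond.2
      have hid : 3 ≤ idx := le_trans (by omega) h1
      have hb : cs[idx-1]? = some '`' := by have := h2 0 (by omega); simpa using this
      have hb2 : cs[idx-2]? = some '`' := by
        have := h2 1 (by omega); simpa [show idx - 1 - 1 = idx - 2 by omega] using this
      have hb3 : cs[idx-3]? = some '`' := by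
        have := h2 2 (by omega); simpa [show idx - 1 - 2 = idx - 3 by omega] using this
      rw [firstFrom_fire cs idx hlt (redexB_s cs idx hid hb3 hb2 hb hs)]
      rw [evalAuxA]
      simp only [dif_pos hlt]
      rw [if_neg (show ¬(tm ≠ 0 ∧ cs[idx] = 'i') from hni),
          if_neg (show ¬(1 < tm ∧ cs[idx] = 'k') from hnk),
          if_pos (show 2 < tm ∧ cs[idx] = 's' from hcond)]
      rw [applyA, if_neg (by simp [hs] : ¬ cs[idx]? = some 'i'),
          if_neg (by simp [hs] : ¬ cs[idx]? = some 'k')]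
  | case7 tm idx hlt c hni hnk hcond yS hfb yE hfb2 hfb3 =>
      have hs : cs[idx]? = some 's' := by
        rw [List.getElem?_eq_getElem hlt]; exact congrArg some hcond.2
      have hid : 3 ≤ idx := le_trans (by omega) h1
      have hb : cs[idx-1]? = some '`' := by have := h2 0 (by omega); simpa using this
      have hb2 : cs[idx-2]? = some '`' := by
        have := h2 1 (by omega); simpa [show idx - 1 - 1 = idx - 2 by omega] using this
      have hb3 : cs[idx-3]? = some '`' := by
        have := h2 2 (by omega); simpa [show idx - 1 - 2 = idx - 3 by omega] using this
      rw [firstFrom_fire cs idx hlt (redexB_s cs idx hid hb3 hb2 hb hs)]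
      rw [evalAuxA]
      simp only [dif_pos hlt]
      rw [if_neg (show ¬(tm ≠ 0 ∧ cs[idx] = 'i') from hni),
          if_neg (show ¬(1 < tm ∧ cs[idx] = 'k') from hnk),
          if_pos (show 2 < tm ∧ cs[idx] = 's' from hcond)]
      rw [applyA, if_neg (by simp [hs] : ¬ cs[idx]? = some 'i'),
          if_neg (by simp [hs] : ¬ cs[idx]? = some 'k')]
  | case8 tm idx hlt c hni hnk hcond yS hfb yE hfb2 zE hfb3 =>
      have hs : cs[idx]? = some 's' := by
        rw [List.getElem?_eq_getElem hlt]; exact congrArg some hcond.2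
      have hid : 3 ≤ idx := le_trans (by omega) h1
      have hb : cs[idx-1]? = some '`' := by have := h2 0 (by omega); simpa using this
      have hb2 : cs[idx-2]? = some '`' := by
        have := h2 1 (by omega); simpa [show idx - 1 - 1 = idx - 2 by omega] using this
      have hb3 : cs[idx-3]? = some '`' := by
        have := h2 2 (by omega); simpa [show idx - 1 - 2 = idx - 3 by omega] using this
      rw [firstFrom_fire cs idx hlt (redexB_s cs idx hid hb3 hb2 hb hs)]
      rw [evalAuxA]
      simp only [dif_pos hlt]
      rw [if_neg (show ¬(tm ≠ 0 ∧ cs[idx] = 'i') from hni),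
          if_neg (show ¬(1 < tm ∧ cs[idx] = 'k') from hnk),
          if_pos (show 2 < tm ∧ cs[idx] = 's' from hcond)]
      rw [applyA, if_neg (by simp [hs] : ¬ cs[idx]? = some 'i'),
          if_neg (by simp [hs] : ¬ cs[idx]? = some 'k')]
  | case9 tm idx hlt c hni hnk hns ih =>
      have hget : cs[idx]? = some cs[idx] := List.getElem?_eq_getElem hlt
      -- no redex fires at idx
      have hnr : redexB cs idx = false := by
        rw [Bool.eq_false_iff]
        intro hr
        rw [redexB] at hr
        simp only [Bool.or_eq_true, Bool.and_eq_true, decide_eq_true_eq, beq_iff_eq] at hr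
        rcases hr with (⟨⟨hd, hb⟩, hc⟩ | ⟨⟨⟨hd, hb2⟩, hb⟩, hc⟩) | ⟨⟨⟨⟨hd, hb3⟩, hb2⟩, hb⟩, hc⟩
        · have hci : cs[idx] = 'i' := by
            exact Option.some_inj.mp (hget.symm.trans hc)
          have htm : tm = 0 := by
            by_contra h0; exact hni ⟨h0, hci⟩
          exact h3 (by omega) (by simpa [htm] using hb)
        · have hck : cs[idx] = 'k' := by
            exact Option.some_inj.mp (hget.symm.trans hc)
          have htm : tm ≤ 1 := by
            by_contra h0; exact hnk ⟨by omega, hck⟩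
          rcases Nat.lt_or_ge tm 1 with h0 | h0
          · have htm0 : tm = 0 := by omega
            exact h3 (by omega) (by simpa [htm0] using hb)
          · have htm1 : tm = 1 := by omega
            exact h3 (by omega) (by simpa [htm1, show idx - 1 - 1 = idx - 2 by omega] using hb2)
        · have hcs : cs[idx] = 's' := by
            exact Option.some_inj.mp (hget.symm.trans hc)
          have htm : tm ≤ 2 := by
            by_contra h0; exact hns ⟨by omega, hcs⟩
          rcases Nat.lt_or_ge tm 1 with h0 | h0
          · have htm0 : tm = 0 := by omega
            exact h3 (by omega) (by simpa [htm0] using hb)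
          · rcases Nat.lt_or_ge tm 2 with h0' | h0'
            · have htm1 : tm = 1 := by omega
              exact h3 (by omega) (by simpa [htm1, show idx - 1 - 1 = idx - 2 by omega] using hb2)
            · have htm2 : tm = 2 := by omega
              exact h3 (by omega) (by simpa [htm2, show idx - 1 - 2 = idx - 3 by omega] using hb3)
      rw [firstFrom_step cs idx hlt hnr]
      rw [evalAuxA]
      simp only [dif_pos hlt]
      rw [if_neg (show ¬(tm ≠ 0 ∧ cs[idx] = 'i') from hni),
          if_neg (show ¬(1 < tm ∧ cs[idx] = 'k') from hnk),
          if_neg (show ¬(2 < tm ∧ cs[idx] = 's') from hns)]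
      by_cases hch : cs[idx] = '`'
      · have hch' : c = '`' := hch
        simp only [hch, hch', reduceIte, reduceDIte] at ih ⊢
        refine ih (by omega) ?_ ?_
        · intro t ht
          rcases Nat.eq_zero_or_pos t with rfl | hpos
          · simpa using (hget.trans (congrArg some hch))
          · have := h2 (t - 1) (by omega)
            rw [show idx + 1 - 1 - t = idx - 1 - (t - 1) by omega]
            exact this
        · intro hlt2
          have := h3 (by omega)
          rw [show idx + 1 - 1 - (tm + 1) = idx - 1 - tm by omega]
          exact this
      · have hch' : ¬ c = '`' := hch
        simp only [hch, hch', reduceDIte, if_false] at ih ⊢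
        refine ih (by omega) (by omega) ?_
        intro _
        simp only [show idx + 1 - 1 - 0 = idx by omega, hget]
        intro hcon
        exact hch (Option.some_inj.mp hcon)
  | case10 tm idx hge =>
      rw [firstFrom_out cs idx hge]
      rw [evalAuxA]
      simp only [dif_neg hge]

lemma redexB_of_le (cs : List Char) (j : Nat) (hj : cs.length ≤ j) : redexB cs j = false := by
  simp [redexB, List.getElem?_eq_none hj]

lemma lt_of_getElem?_some {cs : List Char} {i : Nat} {c : Char} (h : cs[i]? = some c) :
    i < cs.length := by
  by_contra hc
  rw [List.getElem?_eq_none (Nat.le_of_not_lt hc)] at h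
  simp at h

lemma redexB_lt (cs : List Char) (j : Nat) (h : redexB cs j = true) : j < cs.length := by
  rw [redexB] at h
  simp only [Bool.or_eq_true, Bool.and_eq_true, beq_iff_eq] at h
  rcases h with (⟨_, hc⟩ | ⟨_, hc⟩) | ⟨_, hc⟩ <;> exact lt_of_getElem?_some hc

lemma firstFrom_none (cs : List Char) (idx : Nat) (h : firstFrom cs idx = none) :
    ∀ j, idx ≤ j → redexB cs j = false := by
  rw [firstFrom] at h
  have key : ∀ fuel idx, cs.length ≤ idx + fuel → firstFromGo cs fuel idx = none →
      ∀ j, idx ≤ j → redexB cs j = false := by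
    intro fuel
    induction fuel with
    | zero =>
        intro i hfe _ j hj
        exact redexB_of_le cs j (by omega)
    | succ n ih =>
        intro i hfe hgo j hj
        rw [firstFromGo] at hgo
        by_cases hr : redexB cs i = true
        · rw [if_pos hr] at hgo; simp at hgo
        · rw [if_neg hr] at hgo
          rcases Nat.eq_or_lt_of_le hj with rfl | hlt2
          · exact Bool.eq_false_iff.mpr hr
          · exact ih (i + 1) (by omega) hgo j hlt2
  exact key (cs.length - idx) idx (by omega) h

lemma firstFrom_some (cs : List Char) (idx j : Nat) (h : firstFrom cs idx = some j) :
    idx ≤ j ∧ j < cs.length ∧ redexB cs j = true ∧ ∀ t, idx ≤ t → t < j → redexB cs t = false := by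
  rw [firstFrom] at h
  have key : ∀ fuel idx, firstFromGo cs fuel idx = some j →
      idx ≤ j ∧ j < cs.length ∧ redexB cs j = true ∧ ∀ t, idx ≤ t → t < j → redexB cs t = false := by
    intro fuel
    induction fuel with
    | zero => intro i hgo; rw [firstFromGo] at hgo; simp at hgo
    | succ n ih =>
        intro i hgo
        rw [firstFromGo] at hgo
        by_cases hr : redexB cs i = true
        · rw [if_pos hr] at hgo
          obtain rfl : i = j := by simpa using hgo
          exact ⟨le_refl _, redexB_lt cs i hr, hr,
            fun t h1 h2 => absurd (lt_of_le_of_lt h1 h2) (lt_irrefl _)⟩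
        · rw [if_neg hr] at hgo
          obtain ⟨ha, hb, hcc, hd⟩ := ih (i + 1) hgo
          refine ⟨by omega, hb, hcc, fun t h1 h2 => ?_⟩
          rcases Nat.eq_or_lt_of_le h1 with rfl | hlt2
          · exact Bool.eq_false_iff.mpr hr
          · exact hd t hlt2 h2
  exact key (cs.length - idx) idx h

-- pattern occurrence characterised pointwise
lemma prefix_drop_iff (pat l : List Char) (p : Nat) :
    pat <+: l.drop p ↔ ∀ t, (h : t < pat.length) → l[p + t]? = some pat[t] := by
  rw [List.prefix_iff_getElem?]
  simp [List.getElem?_drop]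

-- B's balance scan started at 0 is A's counter scan started at 1
lemma termEnd_zero (cs : List Char) (e : Nat) : termEnd cs 0 e = findBlockEnd cs 1 e := by
  have := termEnd_eq_findBlockEnd cs 1 e
  simpa using this

-- occurrences of the three patterns are exactly redex heads
lemma redex_of_occ_i (cs : List Char) (p : Nat) (h : ['`','i'] <+: cs.drop p) :
    redexB cs (p + 1) = true := by
  rw [prefix_drop_iff] at h
  have h0 := h 0 (by norm_num)
  have h1 := h 1 (by norm_num)
  exact redexB_i cs (p+1) (by omega) (by simpa using h0) (by simpa using h1)

lemma redex_of_occ_k (cs : List Char) (p : Nat) (h : ['`','`','k'] <+: cs.drop p) :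
    redexB cs (p + 2) = true := by
  rw [prefix_drop_iff] at h
  have h0 := h 0 (by norm_num)
  have h1 := h 1 (by norm_num)
  have h2 := h 2 (by norm_num)
  exact redexB_k cs (p+2) (by omega) (by simpa using h0)
    (by simpa [show p + 2 - 1 = p + 1 by omega] using h1) (by simpa using h2)

lemma redex_of_occ_s (cs : List Char) (p : Nat) (h : ['`','`','`','s'] <+: cs.drop p) :
    redexB cs (p + 3) = true := by
  rw [prefix_drop_iff] at h
  have h0 := h 0 (by norm_num)
  have h1 := h 1 (by norm_num)
  have h2 := h 2 (by norm_num)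
  have h3 := h 3 (by norm_num)
  exact redexB_s cs (p+3) (by omega) (by simpa using h0)
    (by simpa [show p + 3 - 2 = p + 1 by omega] using h1)
    (by simpa [show p + 3 - 1 = p + 2 by omega] using h2) (by simpa using h3)

lemma occ_of_redex (cs : List Char) (idx : Nat) (hred : redexB cs idx = true) :
    (cs[idx]? = some 'i' ∧ 1 ≤ idx ∧ ['`','i'] <+: cs.drop (idx - 1)) ∨
    (cs[idx]? = some 'k' ∧ 2 ≤ idx ∧ ['`','`','k'] <+: cs.drop (idx - 2)) ∨
    (cs[idx]? = some 's' ∧ 3 ≤ idx ∧ ['`','`','`','s'] <+: cs.drop (idx - 3)) := by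
  rw [redexB] at hred
  simp only [Bool.or_eq_true, Bool.and_eq_true, decide_eq_true_eq, beq_iff_eq] at hred
  rcases hred with (⟨⟨hd, hb⟩, hc⟩ | ⟨⟨⟨hd, hb2⟩, hb⟩, hc⟩) | ⟨⟨⟨⟨hd, hb3⟩, hb2⟩, hb⟩, hc⟩
  · refine Or.inl ⟨hc, hd, ?_⟩
    rw [prefix_drop_iff]
    intro t ht
    match t, ht with
    | 0, _ => simpa using hb
    | 1, _ => simpa [show idx - 1 + 1 = idx by omega] using hc
  · refine Or.inr (Or.inl ⟨hc, hd, ?_⟩)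
    rw [prefix_drop_iff]
    intro t ht
    match t, ht with
    | 0, _ => simpa using hb2
    | 1, _ => simpa [show idx - 2 + 1 = idx - 1 by omega] using hb
    | 2, _ => simpa [show idx - 2 + 2 = idx by omega] using hc
  · refine Or.inr (Or.inr ⟨hc, hd, ?_⟩)
    rw [prefix_drop_iff]
    intro t ht
    match t, ht with
    | 0, _ => simpa using hb3
    | 1, _ => simpa [show idx - 3 + 1 = idx - 2 by omega] using hb2
    | 2, _ => simpa [show idx - 3 + 2 = idx - 1 by omega] using hb
    | 3, _ => simpa [show idx - 3 + 3 = idx by omega] using hc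

-- a pattern with no redex head anywhere does not occur
lemma find_neg_of_noredex (cs pat : List Char) (L : Nat)
    (hno : ∀ j, redexB cs j = false)
    (hocc : ∀ p, pat <+: cs.drop p → redexB cs (p + L) = true) :
    PySem.Chars.find cs pat = -1 := by
  rw [PySem.Chars.find_eq_neg_one_iff]
  intro hinf
  obtain ⟨p, hp⟩ := (PySem.Chars.exists_prefix_drop_iff_isIn pat cs).mpr
    ((PySem.Chars.isIn_iff_infix pat cs).mpr hinf)
  have := hocc p hp
  rw [hno (p + L)] at this
  exact Bool.noConfusion this

-- reduce the literal three-pattern foldl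
lemma fold_spots (cs : List Char) :
    List.foldl (fun acc pat =>
      let p := PySem.Chars.find cs pat
      if p ≠ -1 then acc ++ [p.toNat + (pat.length - 1)] else acc) []
      [['`','i'], ['`','`','k'], ['`','`','`','s']] =
    (if PySem.Chars.find cs ['`','i'] ≠ -1 then [(PySem.Chars.find cs ['`','i']).toNat + 1] else []) ++
    (if PySem.Chars.find cs ['`','`','k'] ≠ -1 then [(PySem.Chars.find cs ['`','`','k']).toNat + 2] else []) ++
    (if PySem.Chars.find cs ['`','`','`','s'] ≠ -1 then [(PySem.Chars.find cs ['`','`','`','s']).toNat + 3] else []) := by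
  simp only [List.foldl]
  split_ifs <;> simp

lemma mem_spots (a b c : Int) (x y z m : Nat) :
    m ∈ ((if a ≠ -1 then [x] else []) ++ (if b ≠ -1 then [y] else []) ++ (if c ≠ -1 then [z] else [])) ↔
    ((a ≠ -1 ∧ m = x) ∨ (b ≠ -1 ∧ m = y) ∨ (c ≠ -1 ∧ m = z)) := by
  split_ifs <;> simp_all

lemma min?_eq_of (xs : List Nat) (idx : Nat) (hmem : idx ∈ xs) (hlb : ∀ m ∈ xs, idx ≤ m) :
    PySem.List.min? xs (fun x => x) = some idx := by
  cases hm : PySem.List.min? xs (fun x => x) with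
  | none =>
      rw [PySem.List.min?_eq_none_iff] at hm
      subst hm
      exact absurd hmem (List.not_mem_nil)
  | some m =>
      have h1 := PySem.List.min?_mem hm
      have h2 := PySem.List.min?_isMin hm idx hmem
      have h3 := hlb m h1
      have : m = idx := by omega
      rw [this]

-- ===== VERDICT (by name: the statement is the Claim_ definition above) =====
theorem evaluate_unl_ltr_spec : Claim_equal_evaluate_unl_ltr := by
  unfold Claim_equal_evaluate_unl_ltr
  intro unl _hdom _hpre
  unfold Spec_evaluate_unl_ltr
  unfold evaluate_unl_ltr
  rw [evalAuxA_eq unl.toList 0 0 (Nat.le_refl 0) (fun t ht => absurd ht (by omega)) (fun h => absurd h (by omega))]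
  unfold evaluate_unl_ltr_alt
  simp only [fold_spots]
  cases hf : firstFrom unl.toList 0 with
  | none =>
      have hno : ∀ j, redexB unl.toList j = false := fun j => firstFrom_none _ 0 hf j (Nat.zero_le j)
      have hnI := find_neg_of_noredex unl.toList ['`','i'] 1 hno (fun p hp => redex_of_occ_i _ p hp)
      have hnK := find_neg_of_noredex unl.toList ['`','`','k'] 2 hno (fun p hp => redex_of_occ_k _ p hp)
      have hnS := find_neg_of_noredex unl.toList ['`','`','`','s'] 3 hno (fun p hp => redex_of_occ_s _ p hp)
      simp only [hnI, hnK, hnS, ne_eq, not_true_eq_false, reduceIte, List.append_nil]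
      rw [(PySem.List.min?_eq_none_iff ([] : List Nat) (fun x => x)).mpr rfl]
      exact String.ofList_toList
  | some idx =>
      obtain ⟨-, hlen, hred, hmin⟩ := firstFrom_some _ 0 idx hf
      have hget : unl.toList[idx]? = some unl.toList[idx] := List.getElem?_eq_getElem hlen
      have hRlow : ∀ j, redexB unl.toList j = true → idx ≤ j := by
        intro j hj
        by_contra hlt
        rw [hmin j (Nat.zero_le j) (by omega)] at hj
        exact Bool.noConfusion hj
      -- lower bounds for each candidate spot
      have lbI : PySem.Chars.find unl.toList ['`','i'] ≠ -1 →
          idx ≤ (PySem.Chars.find unl.toList ['`','i']).toNat + 1 := by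
        intro hne
        have h0 : 0 ≤ PySem.Chars.find unl.toList ['`','i'] := by
          have := PySem.Chars.neg_one_le_find unl.toList ['`','i']; omega
        exact hRlow _ (redex_of_occ_i _ _ (PySem.Chars.find_spec h0).1)
      have lbK : PySem.Chars.find unl.toList ['`','`','k'] ≠ -1 →
          idx ≤ (PySem.Chars.find unl.toList ['`','`','k']).toNat + 2 := by
        intro hne
        have h0 : 0 ≤ PySem.Chars.find unl.toList ['`','`','k'] := by
          have := PySem.Chars.neg_one_le_find unl.toList ['`','`','k']; omega
        exact hRlow _ (redex_of_occ_k _ _ (PySem.Chars.find_spec h0).1)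
      have lbS : PySem.Chars.find unl.toList ['`','`','`','s'] ≠ -1 →
          idx ≤ (PySem.Chars.find unl.toList ['`','`','`','s']).toNat + 3 := by
        intro hne
        have h0 : 0 ≤ PySem.Chars.find unl.toList ['`','`','`','s'] := by
          have := PySem.Chars.neg_one_le_find unl.toList ['`','`','`','s']; omega
        exact hRlow _ (redex_of_occ_s _ _ (PySem.Chars.find_spec h0).1)
      -- the pattern of the redex at idx puts idx itself among the spots
      have hmem : idx ∈ ((if PySem.Chars.find unl.toList ['`','i'] ≠ -1 then [(PySem.Chars.find unl.toList ['`','i']).toNat + 1] else []) ++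
          (if PySem.Chars.find unl.toList ['`','`','k'] ≠ -1 then [(PySem.Chars.find unl.toList ['`','`','k']).toNat + 2] else []) ++
          (if PySem.Chars.find unl.toList ['`','`','`','s'] ≠ -1 then [(PySem.Chars.find unl.toList ['`','`','`','s']).toNat + 3] else [])) := by
        rw [mem_spots]
        rcases occ_of_redex _ idx hred with ⟨_, hd, hocc⟩ | ⟨_, hd, hocc⟩ | ⟨_, hd, hocc⟩
        · refine Or.inl ?_
          have h0 : 0 ≤ PySem.Chars.find unl.toList ['`','i'] :=
            (PySem.Chars.find_nonneg_iff _ _).mpr ((PySem.Chars.isIn_iff_infix _ _).mp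
              ((PySem.Chars.exists_prefix_drop_iff_isIn _ _).mp ⟨idx - 1, hocc⟩))
          have hup : (PySem.Chars.find unl.toList ['`','i']).toNat ≤ idx - 1 := by
            by_contra hno
            exact ((PySem.Chars.find_spec h0).2 (idx - 1) (by omega)) hocc
          have hne : PySem.Chars.find unl.toList ['`','i'] ≠ -1 := by omega
          exact ⟨hne, by have := lbI hne; omega⟩
        · refine Or.inr (Or.inl ?_)
          have h0 : 0 ≤ PySem.Chars.find unl.toList ['`','`','k'] :=
            (PySem.Chars.find_nonneg_iff _ _).mpr ((PySem.Chars.isIn_iff_infix _ _).mp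
              ((PySem.Chars.exists_prefix_drop_iff_isIn _ _).mp ⟨idx - 2, hocc⟩))
          have hup : (PySem.Chars.find unl.toList ['`','`','k']).toNat ≤ idx - 2 := by
            by_contra hno
            exact ((PySem.Chars.find_spec h0).2 (idx - 2) (by omega)) hocc
          have hne : PySem.Chars.find unl.toList ['`','`','k'] ≠ -1 := by omega
          exact ⟨hne, by have := lbK hne; omega⟩
        · refine Or.inr (Or.inr ?_)
          have h0 : 0 ≤ PySem.Chars.find unl.toList ['`','`','`','s'] :=
            (PySem.Chars.find_nonneg_iff _ _).mpr ((PySem.Chars.isIn_iff_infix _ _).mp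
              ((PySem.Chars.exists_prefix_drop_iff_isIn _ _).mp ⟨idx - 3, hocc⟩))
          have hup : (PySem.Chars.find unl.toList ['`','`','`','s']).toNat ≤ idx - 3 := by
            by_contra hno
            exact ((PySem.Chars.find_spec h0).2 (idx - 3) (by omega)) hocc
          have hne : PySem.Chars.find unl.toList ['`','`','`','s'] ≠ -1 := by omega
          exact ⟨hne, by have := lbS hne; omega⟩
      have hlb : ∀ m ∈ ((if PySem.Chars.find unl.toList ['`','i'] ≠ -1 then [(PySem.Chars.find unl.toList ['`','i']).toNat + 1] else []) ++
          (if PySem.Chars.find unl.toList ['`','`','k'] ≠ -1 then [(PySem.Chars.find unl.toList ['`','`','k']).toNat + 2] else []) ++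
          (if PySem.Chars.find unl.toList ['`','`','`','s'] ≠ -1 then [(PySem.Chars.find unl.toList ['`','`','`','s']).toNat + 3] else [])), idx ≤ m := by
        intro m hm
        rw [mem_spots] at hm
        rcases hm with ⟨hne, rfl⟩ | ⟨hne, rfl⟩ | ⟨hne, rfl⟩
        · exact lbI hne
        · exact lbK hne
        · exact lbS hne
      rw [min?_eq_of _ idx hmem hlb]
      simp only [hget]
      rcases occ_of_redex _ idx hred with ⟨hc, hd, hocc⟩ | ⟨hc, hd, hocc⟩ | ⟨hc, hd, hocc⟩ <;>
        have hcv := Option.some_inj.mp (hget.symm.trans hc)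
      · rw [applyA, if_pos hc, if_pos hcv]
      · rw [applyA, if_neg (by simp [hc]), if_pos hc]
        rw [if_neg (by simp [hcv])]
        simp only [termEnd_zero]
        cases h1 : findBlockEnd unl.toList 1 (idx + 1) with
        | none => rfl
        | some yS =>
            cases h2 : findBlockEnd unl.toList 1 yS with
            | none => simp [h2]
            | some yE => simp [h2, hcv]
      · rw [applyA, if_neg (by simp [hc]), if_neg (by simp [hc])]
        rw [if_neg (by simp [hcv])]
        simp only [termEnd_zero]
        cases h1 : findBlockEnd unl.toList 1 (idx + 1) with
        | none => rfl
        | some yS =>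
            cases h2 : findBlockEnd unl.toList 1 yS with
            | none => simp [h2]
            | some yE =>
                cases h3 : findBlockEnd unl.toList 1 yE with
                | none => simp [h2, h3, hcv]
                | some zE => simp [h2, h3, hcv]
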